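-- pv_equiv track=rewrite | github.com/fpino87-dev/grc-webapp | backend/apps/incidents/nis2_classification.py | _score_riservatezza
-- ===== SOURCE A (Python) =====
-- RISERVATEZZA_RULES = [
--     (True, ["data_breach"], 5),
--     (True, ["data_breach", "intrusion", "insider_threat"], 4),
--     (True, [], 3),
--     (False, ["data_breach"], 3),
--     (False, ["intrusion", "intrusion_attempt", "insider_threat"], 2),
-- ]
--
-- def _score_riservatezza(personal_data: bool, category: str) -> int:
--     """Punteggio asse riservatezza (1-5)."""
--     cat = category or ""
--     for has_pd, categories, score in RISERVATEZZA_RULES: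
--         if has_pd != personal_data:
--             continue
--         if not categories:
--             return score
--         if cat in categories:
--             return score
--     return 1
-- ===== SOURCE B (Python) =====
-- # One flattened score matrix: category -> (score with personal data, score without);
-- # a single lookup replaces the rule-table scan.
-- _RISERVATEZZA_SCORES = {
--     "data_breach": (5, 3),
--     "intrusion": (4, 2),
--     "insider_threat": (4, 2),
--     "intrusion_attempt": (3, 2),
-- }
--
-- def _score_riservatezza(personal_data: bool, category: str) -> int:
--     """Punteggio asse riservatezza (1-5)."""
--     pd_score, other_score = _RISERVATEZZA_SCORES.get(category or "", (3, 1))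
--     return pd_score if personal_data else other_score
-- ===== Notes on version B (the rewrite author's own statement) =====
-- stated objective: simpler
-- what changed: Replaced the ordered rule-table scan with a single precomputed category->(pd_score, non_pd_score) dictionary lookup followed by one component selection.
import Mathlib
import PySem

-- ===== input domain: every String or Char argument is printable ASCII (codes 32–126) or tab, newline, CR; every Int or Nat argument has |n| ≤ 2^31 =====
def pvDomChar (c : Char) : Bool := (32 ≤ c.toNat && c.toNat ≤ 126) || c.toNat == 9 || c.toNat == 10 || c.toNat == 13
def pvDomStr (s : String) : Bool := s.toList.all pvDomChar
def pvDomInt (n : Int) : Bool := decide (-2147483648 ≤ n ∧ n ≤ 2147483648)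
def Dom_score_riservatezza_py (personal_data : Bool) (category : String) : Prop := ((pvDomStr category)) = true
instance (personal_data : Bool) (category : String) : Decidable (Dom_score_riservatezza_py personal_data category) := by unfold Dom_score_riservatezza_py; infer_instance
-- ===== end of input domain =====

-- B replaces A's rule-table scan with one precomputed score-matrix lookup (simpler); return values identical.


-- ===== PORT A =====
-- Port of A: the rule table and the scanning loop, transliterated.
def pvRules : List (Bool × List String × Int) :=
  [ (true,  ["data_breach"], 5),
    (true,  ["data_breach", "intrusion", "insider_threat"], 4),
    (true,  [], 3),
    (false, ["data_breach"], 3),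
    (false, ["intrusion", "intrusion_attempt", "insider_threat"], 2) ]

def pvScan (personal_data : Bool) (cat : String) : List (Bool × List String × Int) → Int
  | [] => 1
  | (has_pd, categories, score) :: rest =>
      if has_pd ≠ personal_data then pvScan personal_data cat rest
      else if categories = [] then score
      else if cat ∈ categories then score
      else pvScan personal_data cat rest

def score_riservatezza_py (personal_data : Bool) (category : String) : Int :=
  let cat := if category = "" then "" else category
  pvScan personal_data cat pvRules

-- ===== PORT B =====
-- Port of B: one flattened score matrix (category -> (pd score, non-pd score)), one lookup.
def pvScores : PySem.Dict String (Int × Int) :=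
  PySem.Dict.ofList
    [ ("data_breach", (5, 3)),
      ("intrusion", (4, 2)),
      ("insider_threat", (4, 2)),
      ("intrusion_attempt", (3, 2)) ]

def score_riservatezza_py_alt (personal_data : Bool) (category : String) : Int :=
  let pair := pvScores.getD (if category = "" then "" else category) (3, 1)
  if personal_data then pair.1 else pair.2

-- ===== PRECONDITION & SPEC =====
def Spec_score_riservatezza_py (personal_data : Bool) (category : String) (out : Int) : Prop := out = score_riservatezza_py_alt personal_data category
instance (personal_data : Bool) (category : String) (out : Int) : Decidable (Spec_score_riservatezza_py personal_data category out) := by unfold Spec_score_riservatezza_py; infer_instance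

-- ===== CLAIM (what is proved, stated in full; the proofs are below) =====
def Claim_equal_score_riservatezza_py : Prop := ∀ (personal_data : Bool) (category : String), Dom_score_riservatezza_py personal_data category → Spec_score_riservatezza_py personal_data category (score_riservatezza_py personal_data category)

-- ===== LEMMAS AND PROOFS =====

-- ===== VERDICT (by name: the statement is the Claim_ definition above) =====
theorem score_riservatezza_py_spec : Claim_equal_score_riservatezza_py := by
  intro personal_data category _
  unfold Spec_score_riservatezza_py score_riservatezza_py score_riservatezza_py_alt pvRules
  have h : pvScores = PySem.Dict.mk
      [ ("data_breach", ((5 : Int), (3 : Int))),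
        ("intrusion", (4, 2)),
        ("insider_threat", (4, 2)),
        ("intrusion_attempt", (3, 2)) ] := rfl
  rw [h]
  by_cases h1 : category = "data_breach"
  · subst h1; cases personal_data <;> decide
  by_cases h2 : category = "intrusion"
  · subst h2; cases personal_data <;> decide
  by_cases h3 : category = "insider_threat"
  · subst h3; cases personal_data <;> decide
  by_cases h4 : category = "intrusion_attempt"
  · subst h4; cases personal_data <;> decide
  by_cases h0 : category = ""
  · subst h0; cases personal_data <;> decide
  · cases personal_data <;>
      simp [pvScan, PySem.Dict.getD_eq_get?_getD, PySem.Dict.get?_mk_cons,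
        PySem.Dict.get?, h0, h1, h2, h3, h4, Ne.symm h1, Ne.symm h2, Ne.symm h3, Ne.symm h4]
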